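-- pv_equiv track=rewrite | github.com/rsprenkels/kattis | python/1_8/marko.py | marko
-- ===== SOURCE A (Python) =====
-- from collections import defaultdict
-- from typing import Sequence
--
-- def marko(words: Sequence[str], digits: str) -> int:
--     t9 = {'2':'abc', '3':'def', '4':'ghi', '5':'jkl', '6':'mno', '7':'pqrs', '8':'tuv', '9':'wxyz'}
--     t9_rev = {}
--     for key, value in t9.items():
--         for letter in value:
--             t9_rev[letter] = key
--     dd = defaultdict(int)
--     for word in words:
--         t9_code = ''.join([t9_rev[letter] for letter in word])
--         dd[t9_code] += 1
--     return dd[digits]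
-- ===== SOURCE B (Python) =====
-- def marko(words, digits):
--     # Verify in the decode direction: no reverse letter->digit map and no word
--     # encoding; precompute the allowed letter-group per digit position, then a
--     # word counts iff it has the right length and each letter lies in its group.
--     t9 = {'2': 'abc', '3': 'def', '4': 'ghi', '5': 'jkl', '6': 'mno', '7': 'pqrs', '8': 'tuv', '9': 'wxyz'}
--     groups = [t9.get(d, '') for d in digits]
--     count = 0
--     for word in words:
--         if len(word) == len(groups) and all(c in g for c, g in zip(word, groups)):
--             count += 1
--     return count
-- ===== Notes on version B (the rewrite author's own statement) =====
-- stated objective: alternative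
-- what changed: B works in the decode direction: it never builds A's reverse letter-to-digit map nor encodes any word; it precomputes the allowed letter-group per digit position from the forward T9 table and counts words of the right length whose every letter lies in its position's group.
import Mathlib
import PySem

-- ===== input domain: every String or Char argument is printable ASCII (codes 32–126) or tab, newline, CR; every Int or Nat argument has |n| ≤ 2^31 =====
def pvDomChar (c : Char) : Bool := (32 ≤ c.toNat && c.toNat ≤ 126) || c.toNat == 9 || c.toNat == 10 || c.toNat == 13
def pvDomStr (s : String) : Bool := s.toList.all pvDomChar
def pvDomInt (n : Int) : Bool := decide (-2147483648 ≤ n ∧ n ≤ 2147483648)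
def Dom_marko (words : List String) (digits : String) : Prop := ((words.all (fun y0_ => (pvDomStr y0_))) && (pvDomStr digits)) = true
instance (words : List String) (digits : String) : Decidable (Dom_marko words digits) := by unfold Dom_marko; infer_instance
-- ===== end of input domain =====

-- B verifies in the decode direction (per-position letter groups from the forward table) instead of
-- encoding every word through a reverse map and building a histogram (objective: alternative).

-- ===== PORT A =====
-- the dict literal t9, in insertion order
def t9A : PySem.Dict String String :=
  (((((((PySem.Dict.empty.insert "2" "abc").insert "3" "def").insert "4" "ghi").insert "5" "jkl").insert "6" "mno").insert "7" "pqrs").insert "8" "tuv").insert "9" "wxyz"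

-- the nested loop building t9_rev
def t9revA : PySem.Dict Char String :=
  t9A.items.foldl (fun d kv => kv.2.toList.foldl (fun d letter => d.insert letter kv.1) d) PySem.Dict.empty

-- ''.join([t9_rev[letter] for letter in word]); t9_rev[letter] raises KeyError on a
-- letter outside a–z (Pre_ excludes that), where the port defaults to ""
def codeA (word : String) : String :=
  PySem.Str.join "" (word.toList.map (fun letter => (t9revA.get? letter).getD ""))

def marko (words : List String) (digits : String) : Int :=
  let dd : PySem.Dict String Int :=
    words.foldl (fun dd word => dd.modify (codeA word) 0 (· + 1)) PySem.Dict.empty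
  dd.getD digits 0

-- ===== PORT B =====
-- B's own copy of the forward table t9
def t9B : PySem.Dict String String :=
  (((((((PySem.Dict.empty.insert "2" "abc").insert "3" "def").insert "4" "ghi").insert "5" "jkl").insert "6" "mno").insert "7" "pqrs").insert "8" "tuv").insert "9" "wxyz"

-- groups = [t9.get(d, '') for d in digits]
def groupsB (digits : String) : List String :=
  digits.toList.map (fun d => t9B.getD (String.singleton d) "")

-- len(word) == len(groups) and all(c in g for c, g in zip(word, groups))
def matchesB (groups : List String) (word : String) : Bool :=
  (PySem.Str.len word == (groups.length : Int)) &&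
    (word.toList.zip groups).all (fun p => PySem.Str.isIn (String.singleton p.1) p.2)

def marko_alt (words : List String) (digits : String) : Int :=
  let groups := groupsB digits
  words.foldl (fun count word => if matchesB groups word then count + 1 else count) 0

-- ===== PRECONDITION & SPEC =====
-- A raises KeyError when some word contains a character outside lowercase a–z; Pre_ excludes exactly those inputs.
def Pre_marko (words : List String) (digits : String) : Prop :=
  (words.all (fun w => w.toList.all (fun c => 'a' ≤ c && c ≤ 'z'))) = true
instance (words : List String) (digits : String) : Decidable (Pre_marko words digits) := by unfold Pre_marko; infer_instance
def pvWitness_marko : List String × String := (["cab", "abc", "x"], "222")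

def Spec_marko (words : List String) (digits : String) (out : Int) : Prop := out = marko_alt words digits
instance (words : List String) (digits : String) (out : Int) : Decidable (Spec_marko words digits out) := by unfold Spec_marko; infer_instance

-- ===== CLAIM (what is proved, stated in full; the proofs are below) =====
def Claim_equal_marko : Prop := ∀ (words : List String) (digits : String), Dom_marko words digits → Pre_marko words digits → Spec_marko words digits (marko words digits)

-- ===== LEMMAS AND PROOFS =====

-- proof-side helpers: the lowercase alphabet and the per-letter digit of the T9 layout
def lcChars : List Char :=
  ['a','b','c','d','e','f','g','h','i','j','k','l','m','n','o','p','q','r','s','t','u','v','w','x','y','z']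

def digChar (c : Char) : Char :=
  if c ≤ 'c' then '2' else if c ≤ 'f' then '3' else if c ≤ 'i' then '4'
  else if c ≤ 'l' then '5' else if c ≤ 'o' then '6' else if c ≤ 's' then '7'
  else if c ≤ 'v' then '8' else '9'

theorem lower_mem_lc (c : Char) (h : ('a' ≤ c && c ≤ 'z') = true) : c ∈ lcChars := by
  have hb : 97 ≤ c.toNat ∧ c.toNat ≤ 122 := by
    simp [Char.le_def] at h
    exact ⟨h.1, h.2⟩
  rw [← Char.ofNat_toNat c]
  obtain ⟨h1, h2⟩ := hb
  interval_cases h : c.toNat <;> decide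

theorem lc_facts (c : Char) (hc : c ∈ lcChars) :
    (t9revA.get? c == some (String.ofList [digChar c])) &&
    (['2','3','4','5','6','7','8','9'].contains (digChar c)) &&
    (PySem.Str.isIn (String.singleton c) "abc" == (digChar c == '2')) &&
    (PySem.Str.isIn (String.singleton c) "def" == (digChar c == '3')) &&
    (PySem.Str.isIn (String.singleton c) "ghi" == (digChar c == '4')) &&
    (PySem.Str.isIn (String.singleton c) "jkl" == (digChar c == '5')) &&
    (PySem.Str.isIn (String.singleton c) "mno" == (digChar c == '6')) &&
    (PySem.Str.isIn (String.singleton c) "pqrs" == (digChar c == '7')) &&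
    (PySem.Str.isIn (String.singleton c) "tuv" == (digChar c == '8')) &&
    (PySem.Str.isIn (String.singleton c) "wxyz" == (digChar c == '9')) &&
    (PySem.Str.isIn (String.singleton c) "" == false) = true := by
  fin_cases hc <;> decide

theorem revA_get (c : Char) (hc : c ∈ lcChars) :
    t9revA.get? c = some (String.ofList [digChar c]) := by
  have h := lc_facts c hc
  simp only [Bool.and_eq_true, beq_iff_eq] at h
  exact h.1.1.1.1.1.1.1.1.1.1

theorem key_beq (c d : Char) : (String.ofList [c] == String.singleton d) = (c == d) := by
  simp [String.singleton, String.ext_iff, String.toList_ofList]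

set_option maxHeartbeats 1000000 in
theorem g_eq (d : Char) : (t9B.getD (String.singleton d) "") =
    if d = '2' then "abc" else if d = '3' then "def" else if d = '4' then "ghi"
    else if d = '5' then "jkl" else if d = '6' then "mno" else if d = '7' then "pqrs"
    else if d = '8' then "tuv" else if d = '9' then "wxyz" else "" := by
  have h : t9B = PySem.Dict.mk [("2","abc"),("3","def"),("4","ghi"),("5","jkl"),("6","mno"),("7","pqrs"),("8","tuv"),("9","wxyz")] := by rfl
  rw [h]
  simp only [PySem.Dict.getD, PySem.Dict.get?_mk_cons,
    show ("2":String) = String.ofList ['2'] from rfl, show ("3":String) = String.ofList ['3'] from rfl,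
    show ("4":String) = String.ofList ['4'] from rfl, show ("5":String) = String.ofList ['5'] from rfl,
    show ("6":String) = String.ofList ['6'] from rfl, show ("7":String) = String.ofList ['7'] from rfl,
    show ("8":String) = String.ofList ['8'] from rfl, show ("9":String) = String.ofList ['9'] from rfl,
    key_beq, beq_iff_eq]
  split_ifs <;> simp_all [PySem.Dict.get?] <;> simp_all [eq_comm]

theorem char_in_group (c : Char) (hc : c ∈ lcChars) (d : Char) :
    PySem.Str.isIn (String.singleton c) (t9B.getD (String.singleton d) "") = (digChar c == d) := by
  have h := lc_facts c hc
  simp only [Bool.and_eq_true, beq_iff_eq] at h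
  obtain ⟨⟨⟨⟨⟨⟨⟨⟨⟨⟨_, hmem⟩, h2⟩, h3⟩, h4⟩, h5⟩, h6⟩, h7⟩, h8⟩, h9⟩, hnil⟩ := h
  rw [g_eq]
  split_ifs with e2 e3 e4 e5 e6 e7 e8 e9
  · subst e2; exact h2
  · subst e3; exact h3
  · subst e4; exact h4
  · subst e5; exact h5
  · subst e6; exact h6
  · subst e7; exact h7
  · subst e8; exact h8
  · subst e9; exact h9
  · rw [of_decide_eq_true hnil]; symm
    rw [beq_eq_false_iff_ne]
    simp only [List.contains_eq_mem, decide_eq_true_eq, List.mem_cons, List.not_mem_nil, or_false] at hmem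
    rcases hmem with h|h|h|h|h|h|h|h <;> rw [h] <;>
      first
        | exact fun e => e2 e.symm | exact fun e => e3 e.symm | exact fun e => e4 e.symm
        | exact fun e => e5 e.symm | exact fun e => e6 e.symm | exact fun e => e7 e.symm
        | exact fun e => e8 e.symm | exact fun e => e9 e.symm

theorem code_toList (word : String) (h : ∀ c ∈ word.toList, c ∈ lcChars) :
    (codeA word).toList = word.toList.map digChar := by
  unfold codeA
  rw [PySem.Str.toList_join]
  have hmap : (word.toList.map (fun letter => (t9revA.get? letter).getD "")).map String.toList
      = (word.toList.map digChar).map (fun ch => [ch]) := by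
    rw [List.map_map, List.map_map]
    apply List.map_congr_left
    intro c hcmem
    simp [revA_get c (h c hcmem), String.toList_ofList]
  rw [hmap]
  have hsep : ("" : String).toList = [] := rfl
  rw [hsep, PySem.Chars.join_nil_singletons]

theorem zipmatch (wl : List Char) (dl : List Char) (h : ∀ c ∈ wl, c ∈ lcChars) :
    ((((wl.length : Int)) == (dl.length : Int)) &&
      (wl.zip (dl.map (fun d => t9B.getD (String.singleton d) ""))).all
        (fun p => PySem.Str.isIn (String.singleton p.1) p.2)) = true
    ↔ wl.map digChar = dl := by
  induction wl generalizing dl with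
  | nil => cases dl <;> simp
           omega
  | cons c wl ih =>
    cases dl with
    | nil => simp; omega
    | cons d dl =>
      have hc := h c (by simp)
      have ih' := ih dl (fun x hx => h x (List.mem_cons_of_mem _ hx))
      simp only [List.map_cons, List.zip_cons_cons, List.all_cons, List.length_cons,
        Bool.and_eq_true, beq_iff_eq, char_in_group c hc d, List.cons.injEq] at *
      constructor
      · rintro ⟨hlen, hd, hall⟩
        exact ⟨hd, ih'.mp ⟨by omega, hall⟩⟩
      · rintro ⟨hd, htl⟩
        obtain ⟨hlen, hall⟩ := ih'.mpr htl
        exact ⟨by omega, hd, hall⟩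

theorem matchesB_eq (digits word : String) (h : ∀ c ∈ word.toList, c ∈ lcChars) :
    matchesB (groupsB digits) word = (codeA word == digits) := by
  have hlist := zipmatch word.toList digits.toList h
  have hcode : codeA word = digits ↔ word.toList.map digChar = digits.toList := by
    rw [String.ext_iff, code_toList word h]
  rw [Bool.eq_iff_iff]
  unfold matchesB groupsB
  rw [PySem.Str.len_eq, List.length_map, beq_iff_eq (a := codeA word), hcode]
  exact hlist

theorem countB (digits : String) (l : List String) (n : Int)
    (h : ∀ w ∈ l, ∀ c ∈ w.toList, c ∈ lcChars) :
    l.foldl (fun count word => if matchesB (groupsB digits) word then count + 1 else count) n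
      = n + ((l.map codeA).count digits : Int) := by
  induction l generalizing n with
  | nil => simp
  | cons w t ih =>
      have hw := h w (by simp)
      have ht := fun x hx => h x (List.mem_cons_of_mem _ hx)
      simp only [List.foldl_cons, ih _ ht, List.map_cons, List.count_cons, matchesB_eq digits w hw]
      by_cases hcw : codeA w = digits
      · simp [hcw]
        ring
      · simp [hcw]

theorem hist_getD (digits : String) (l : List String) (d : PySem.Dict String Int) :
    (l.foldl (fun dd word => dd.modify (codeA word) 0 (· + 1)) d).getD digits 0
      = d.getD digits 0 + ((l.map codeA).count digits : Int) := by
  induction l generalizing d with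
  | nil => simp
  | cons w t ih =>
      simp only [List.foldl_cons, ih, List.map_cons, List.count_cons,
        PySem.Dict.getD_modify]
      by_cases h : digits = codeA w
      · simp [h]; ring
      · simp [h, Ne.symm h]

-- ===== VERDICT (by name: the statement is the Claim_ definition above) =====
theorem marko_spec : Claim_equal_marko := by
  intro words digits _ hpre
  unfold Spec_marko marko marko_alt
  have hlc : ∀ w ∈ words, ∀ c ∈ w.toList, c ∈ lcChars := by
    unfold Pre_marko at hpre
    simp only [List.all_eq_true] at hpre
    intro w hw c hc
    exact lower_mem_lc c (hpre w hw c hc)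
  rw [countB digits words 0 hlc, hist_getD]
  simp [PySem.Dict.getD, PySem.Dict.empty, PySem.Dict.get?]
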